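-- pv_equiv track=rewrite | github.com/Savoie-Research-Group/yarp | yarp/sieve.py | compare_paths_els
-- ===== SOURCE A (Python) =====
-- def compare_paths_els(test_e_paths,e_paths):
--     test_e_path_lens = [ len(_) for _ in test_e_paths ]
--     e_path_lens = [ len(_) for _ in e_paths ]
--     test_e_paths_bools = [ [] for _ in range(len(test_e_paths)) ]
--     for count_i,i in enumerate(test_e_paths):
--         for count_j,j in enumerate(e_paths):
--             if test_e_path_lens[count_i] >= e_path_lens[count_j]:
--                 if test_e_paths[count_i][:e_path_lens[count_j]] == e_paths[count_j]:
--                     test_e_paths_bools[count_i].append(True)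
--                 else:
--                     test_e_paths_bools[count_i].append(False)
--             else:
--                 if test_e_paths[count_i] == e_paths[count_j][:test_e_path_lens[count_i]]:
--                     test_e_paths_bools[count_i].append(None)
--                 else:
--                     test_e_paths_bools[count_i].append(False)
--     return test_e_paths_bools
-- ===== SOURCE B (Python) =====
-- def compare_paths_els(test_e_paths, e_paths):
--     # Hash-index approach: set membership of whole prefixes replaces A's pairwise
--     # slice comparisons.  Only prefixes at lengths occurring on the other side are
--     # indexed, so each cell is two O(1)-expected set lookups (after hashing).
--     e_len_set = {len(e) for e in e_paths}
--     t_len_set = {len(t) for t in test_e_paths}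
--     e_keys = [tuple(e) for e in e_paths]
--     proper_prefix_sets = [{tuple(e[:k]) for k in t_len_set if k < len(e)}
--                           for e in e_paths]
--     rows = []
--     for t in test_e_paths:
--         tk = tuple(t)
--         t_prefixes = {tuple(t[:k]) for k in e_len_set if k <= len(t)}
--         rows.append([True if ek in t_prefixes
--                      else (None if tk in pp else False)
--                      for ek, pp in zip(e_keys, proper_prefix_sets)])
--     return rows
-- ===== Notes on version B (the rewrite author's own statement) =====
-- stated objective: alternative
-- what changed: Replaces A's index-based double loop with per-pair element-wise slice comparisons by a hash-index: each e_path gets a precomputed set of its prefixes at the test-path lengths, each test path a set of its prefixes at the e_path lengths, and every matrix cell becomes two whole-tuple set membership tests.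
import Mathlib
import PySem

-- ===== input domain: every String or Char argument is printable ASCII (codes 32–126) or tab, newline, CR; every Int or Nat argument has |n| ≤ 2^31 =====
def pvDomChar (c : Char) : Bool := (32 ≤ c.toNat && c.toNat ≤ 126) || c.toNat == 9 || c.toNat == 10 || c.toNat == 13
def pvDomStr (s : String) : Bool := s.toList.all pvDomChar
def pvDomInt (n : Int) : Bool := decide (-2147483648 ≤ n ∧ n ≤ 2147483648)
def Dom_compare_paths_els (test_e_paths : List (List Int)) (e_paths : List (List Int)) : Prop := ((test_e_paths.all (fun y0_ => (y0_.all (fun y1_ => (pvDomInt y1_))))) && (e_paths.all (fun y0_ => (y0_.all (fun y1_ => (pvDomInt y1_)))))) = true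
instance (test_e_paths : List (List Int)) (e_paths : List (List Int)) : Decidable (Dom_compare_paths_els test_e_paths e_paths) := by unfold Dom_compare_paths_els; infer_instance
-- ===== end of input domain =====

-- B replaces A's pairwise slice comparisons by a hash-index: a set of prefixes (at the
-- lengths occurring on the other side) is precomputed per path, so each matrix cell is
-- two whole-tuple set membership tests (objective: alternative).

-- ===== PORT A =====
def compare_paths_els (test_e_paths : List (List Int)) (e_paths : List (List Int)) : List (List (Option Bool)) :=
  let test_e_path_lens : List Int := test_e_paths.map (fun p => (p.length : Int))
  let e_path_lens : List Int := e_paths.map (fun p => (p.length : Int))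
  (PySem.List.enumerate test_e_paths 0).map (fun ci =>
    (PySem.List.enumerate e_paths 0).foldl (fun row cj =>
      if PySem.List.pyGetD test_e_path_lens ci.1 0 ≥ PySem.List.pyGetD e_path_lens cj.1 0 then
        if PySem.List.slice (PySem.List.pyGetD test_e_paths ci.1 []) none (some (PySem.List.pyGetD e_path_lens cj.1 0)) = PySem.List.pyGetD e_paths cj.1 [] then
          row ++ [some true]
        else
          row ++ [some false]
      else
        if PySem.List.pyGetD test_e_paths ci.1 [] = PySem.List.slice (PySem.List.pyGetD e_paths cj.1 []) none (some (PySem.List.pyGetD test_e_path_lens ci.1 0)) then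
          row ++ [none]
        else
          row ++ [some false]) [])

-- ===== PORT B =====
-- {len(p) for p in ps}
def pvLenSet (ps : List (List Int)) : PySem.Set Int :=
  PySem.Set.ofList (ps.map (fun p => (p.length : Int)))

-- {tuple(t[:k]) for k in ls if k <= len(t)}
def pvFullPrefixSet (ls : PySem.Set Int) (t : List Int) : PySem.Set (List Int) :=
  PySem.Set.ofList ((ls.filter (fun k => decide (k ≤ (t.length : Int)))).map
    (fun k => PySem.List.slice t none (some k)))

-- {tuple(e[:k]) for k in ls if k < len(e)}
def pvProperPrefixSet (ls : PySem.Set Int) (e : List Int) : PySem.Set (List Int) :=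
  PySem.Set.ofList ((ls.filter (fun k => decide (k < (e.length : Int)))).map
    (fun k => PySem.List.slice e none (some k)))

def compare_paths_els_alt (test_e_paths : List (List Int)) (e_paths : List (List Int)) : List (List (Option Bool)) :=
  let e_len_set := pvLenSet e_paths
  let t_len_set := pvLenSet test_e_paths
  let e_keys := e_paths
  let proper_prefix_sets := e_paths.map (fun e => pvProperPrefixSet t_len_set e)
  test_e_paths.map (fun t =>
    let tk := t
    let t_prefixes := pvFullPrefixSet e_len_set t
    (e_keys.zip proper_prefix_sets).map (fun p =>
      if PySem.Set.contains t_prefixes p.1 then some true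
      else if PySem.Set.contains p.2 tk then none
      else some false))

-- ===== PRECONDITION & SPEC =====
def Spec_compare_paths_els (test_e_paths : List (List Int)) (e_paths : List (List Int)) (out : List (List (Option Bool))) : Prop := out = compare_paths_els_alt test_e_paths e_paths
instance (test_e_paths : List (List Int)) (e_paths : List (List Int)) (out : List (List (Option Bool))) : Decidable (Spec_compare_paths_els test_e_paths e_paths out) := by unfold Spec_compare_paths_els; infer_instance

-- ===== CLAIM (what is proved, stated in full; the proofs are below) =====
def Claim_equal_compare_paths_els : Prop := ∀ (test_e_paths : List (List Int)) (e_paths : List (List Int)), Dom_compare_paths_els test_e_paths e_paths → Spec_compare_paths_els test_e_paths e_paths (compare_paths_els test_e_paths e_paths)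

-- ===== LEMMAS AND PROOFS =====

-- A's per-cell value after resolving the index lookups
def pvACell (t e : List Int) : Option Bool :=
  if (t.length : Int) ≥ (e.length : Int) then
    (if t.take e.length = e then some true else some false)
  else
    (if t = e.take t.length then (none : Option Bool) else some false)

-- B's per-cell value (the let-bound sets written out)
def pvBCell (test_e_paths e_paths : List (List Int)) (t e : List Int) : Option Bool :=
  if PySem.Set.contains (pvFullPrefixSet (pvLenSet e_paths) t) e then some true
  else if PySem.Set.contains (pvProperPrefixSet (pvLenSet test_e_paths) e) t then none
  else some false

lemma mem_full (es : List (List Int)) (t e : List Int) (he : e ∈ es) :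
    e ∈ pvFullPrefixSet (pvLenSet es) t ↔ e.length ≤ t.length ∧ t.take e.length = e := by
  unfold pvFullPrefixSet pvLenSet
  rw [PySem.Set.mem_ofList, List.mem_map]
  constructor
  · rintro ⟨k, hk, rfl⟩
    rw [List.mem_filter] at hk
    obtain ⟨hkmem, hkle⟩ := hk
    rw [PySem.Set.mem_ofList, List.mem_map] at hkmem
    obtain ⟨p, _, rfl⟩ := hkmem
    rw [decide_eq_true_iff] at hkle
    rw [show ((p.length : Int)) = ((p.length : Nat) : Int) from rfl, PySem.List.slice_to_natCast]
    have hple : p.length ≤ t.length := by exact_mod_cast hkle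
    have hlen : (t.take p.length).length = p.length := by simp [List.length_take]; omega
    rw [hlen]
    exact ⟨hple, by simp⟩
  · rintro ⟨h1, h2⟩
    refine ⟨(e.length : Int), ?_, ?_⟩
    · rw [List.mem_filter]
      refine ⟨(PySem.Set.mem_ofList _ _).mpr (List.mem_map.mpr ⟨e, he, rfl⟩), ?_⟩
      rw [decide_eq_true_iff]
      exact_mod_cast h1
    · rw [PySem.List.slice_to_natCast]
      simpa using h2
  
lemma mem_proper (ts : List (List Int)) (t e : List Int) (ht : t ∈ ts) :
    t ∈ pvProperPrefixSet (pvLenSet ts) e ↔ t.length < e.length ∧ e.take t.length = t := by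
  unfold pvProperPrefixSet pvLenSet
  rw [PySem.Set.mem_ofList, List.mem_map]
  constructor
  · rintro ⟨k, hk, rfl⟩
    rw [List.mem_filter] at hk
    obtain ⟨hkmem, hklt⟩ := hk
    rw [PySem.Set.mem_ofList, List.mem_map] at hkmem
    obtain ⟨p, _, rfl⟩ := hkmem
    rw [decide_eq_true_iff] at hklt
    rw [show ((p.length : Int)) = ((p.length : Nat) : Int) from rfl, PySem.List.slice_to_natCast]
    have hplt : p.length < e.length := by exact_mod_cast hklt
    have hlen : (e.take p.length).length = p.length := by simp [List.length_take]; omega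
    rw [hlen]
    exact ⟨hplt, by simp⟩
  · rintro ⟨h1, h2⟩
    refine ⟨(t.length : Int), ?_, ?_⟩
    · rw [List.mem_filter]
      refine ⟨(PySem.Set.mem_ofList _ _).mpr (List.mem_map.mpr ⟨t, ht, rfl⟩), ?_⟩
      rw [decide_eq_true_iff]
      exact_mod_cast h1
    · rw [PySem.List.slice_to_natCast]
      simpa using h2

lemma cell_eq (ts es : List (List Int)) (t e : List Int) (ht : t ∈ ts) (he : e ∈ es) :
    pvACell t e = pvBCell ts es t e := by
  unfold pvACell pvBCell
  rcases Nat.lt_or_ge t.length e.length with hlt | hle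
  · rw [if_neg (by exact_mod_cast Nat.not_le.mpr hlt : ¬ (t.length : Int) ≥ (e.length : Int))]
    have hb1 : ¬ PySem.Set.contains (pvFullPrefixSet (pvLenSet es) t) e = true := by
      rw [PySem.Set.contains_iff, mem_full es t e he]; rintro ⟨h, _⟩; omega
    by_cases h2 : t = e.take t.length
    · have hb2 : PySem.Set.contains (pvProperPrefixSet (pvLenSet ts) e) t = true := by
        rw [PySem.Set.contains_iff, mem_proper ts t e ht]; exact ⟨hlt, h2.symm⟩
      rw [if_pos h2, if_neg hb1, if_pos hb2]
    · have hb2 : ¬ PySem.Set.contains (pvProperPrefixSet (pvLenSet ts) e) t = true := by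
        rw [PySem.Set.contains_iff, mem_proper ts t e ht]; rintro ⟨_, h⟩; exact h2 h.symm
      rw [if_neg h2, if_neg hb1, if_neg hb2]
  · rw [if_pos (by exact_mod_cast hle : (t.length : Int) ≥ (e.length : Int))]
    by_cases h2 : t.take e.length = e
    · have hb : PySem.Set.contains (pvFullPrefixSet (pvLenSet es) t) e = true := by
        rw [PySem.Set.contains_iff, mem_full es t e he]; exact ⟨hle, h2⟩
      rw [if_pos h2, if_pos hb]
    · have hb1 : ¬ PySem.Set.contains (pvFullPrefixSet (pvLenSet es) t) e = true := by
        rw [PySem.Set.contains_iff, mem_full es t e he]; rintro ⟨_, h⟩; exact h2 h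
      have hb2 : ¬ PySem.Set.contains (pvProperPrefixSet (pvLenSet ts) e) t = true := by
        rw [PySem.Set.contains_iff, mem_proper ts t e ht]; rintro ⟨h, _⟩; omega
      rw [if_neg h2, if_neg hb1, if_neg hb2]

lemma zip_self_map {α β γ : Type} (f : α → β) (g : α × β → γ) (l : List α) :
    (l.zip (l.map f)).map g = l.map (fun x => g (x, f x)) := by
  induction l with
  | nil => rfl
  | cons x l ih => simp [ih]

lemma pvFlatMapSingleton {α β : Type} (f : α → β) (l : List α) :
    l.flatMap (fun x => [f x]) = l.map f := by
  induction l with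
  | nil => rfl
  | cons x l ih => simp [List.flatMap_cons, ih]

lemma row_eq (t : List Int) (test_e_paths e_paths : List (List Int)) (k : Nat)
    (hk : k < test_e_paths.length) (ht : test_e_paths[k] = t) :
    (PySem.List.enumerate e_paths 0).foldl (fun row cj =>
      if PySem.List.pyGetD (test_e_paths.map (fun p => (p.length : Int))) (k : Int) 0 ≥ PySem.List.pyGetD (e_paths.map (fun p => (p.length : Int))) cj.1 0 then
        if PySem.List.slice (PySem.List.pyGetD test_e_paths (k : Int) []) none (some (PySem.List.pyGetD (e_paths.map (fun p => (p.length : Int))) cj.1 0)) = PySem.List.pyGetD e_paths cj.1 [] then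
          row ++ [some true]
        else
          row ++ [some false]
      else
        if PySem.List.pyGetD test_e_paths (k : Int) [] = PySem.List.slice (PySem.List.pyGetD e_paths cj.1 []) none (some (PySem.List.pyGetD (test_e_paths.map (fun p => (p.length : Int))) (k : Int) 0)) then
          row ++ [none]
        else
          row ++ [some false]) [] = e_paths.map (fun e => pvACell t e) := by
  have hT : PySem.List.pyGetD test_e_paths (k : Int) [] = t := by
    rw [PySem.List.pyGetD_natCast, List.getD_eq_getElem?_getD, List.getElem?_eq_getElem hk, ht]
    rfl
  have hTL : PySem.List.pyGetD (test_e_paths.map (fun p => (p.length : Int))) (k : Int) 0 = (t.length : Int) := by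
    rw [PySem.List.pyGetD_natCast, List.getD_eq_getElem?_getD, List.getElem?_map]
    simp [List.getElem?_eq_getElem hk, ht]
  rw [PySem.List.foldl_congr_mem (g := fun row cj => row ++ [pvACell t cj.2])]
  · rw [PySem.List.foldl_append_eq_flatMap, List.nil_append, pvFlatMapSingleton,
      show (fun cj : Int × List Int => pvACell t cj.2) = (fun e => pvACell t e) ∘ (·.2) from rfl,
      ← List.map_map, PySem.List.map_snd_enumerate]
  · intro acc cj hmem
    rcases (PySem.List.mem_enumerate_iff _ _ _).1 hmem with ⟨m, hm, rfl⟩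
    have hE : PySem.List.pyGetD e_paths ((0 : Int) + (m : Int)) [] = e_paths[m] := by
      have : ((0 : Int) + (m : Int)) = ((m : Nat) : Int) := by omega
      rw [this, PySem.List.pyGetD_natCast, List.getD_eq_getElem?_getD, List.getElem?_eq_getElem hm]
      rfl
    have hEL : PySem.List.pyGetD (e_paths.map (fun p => (p.length : Int))) ((0 : Int) + (m : Int)) 0 = (e_paths[m].length : Int) := by
      have : ((0 : Int) + (m : Int)) = ((m : Nat) : Int) := by omega
      rw [this, PySem.List.pyGetD_natCast, List.getD_eq_getElem?_getD, List.getElem?_map]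
      simp [List.getElem?_eq_getElem hm]
    simp only [hT, hTL, hE, hEL]
    rw [PySem.List.slice_to_natCast, PySem.List.slice_to_natCast]
    unfold pvACell
    split_ifs <;> rfl

-- ===== VERDICT (by name: the statement is the Claim_ definition above) =====
theorem compare_paths_els_spec : Claim_equal_compare_paths_els := by
  intro ts es _
  show compare_paths_els ts es = compare_paths_els_alt ts es
  unfold compare_paths_els compare_paths_els_alt
  simp only [zip_self_map]
  apply List.ext_getElem
  · simp [PySem.List.length_enumerate]
  · intro k h1 h2
    simp only [List.getElem_map, PySem.List.getElem_enumerate]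
    simp only [List.length_map] at h2
    have : ((0 : Int) + (k : Int)) = ((k : Nat) : Int) := by omega
    rw [this]
    rw [row_eq ts[k] ts es k h2 rfl]
    apply List.map_congr_left
    intro e hmem
    exact cell_eq ts es ts[k] e (List.getElem_mem h2) hmem
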